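-- pv_equiv track=rewrite | github.com/voidus/y-cli | src/chat/openrouter_manager.py | split_content
-- ===== SOURCE A (Python) =====
-- from typing import List, Dict, Optional, AsyncGenerator, Union
--
-- def split_content(content: str) -> tuple[str, Optional[str]]:
--     """Split content into plain text and tool definition parts.
--
--     Args:
--         content: The content to split
--
--     Returns:
--         Tuple of (plain content, tool content)
--     """
--     tool_tags = [
--         "use_mcp_tool",
--         "access_mcp_resource"
--     ]
--
--     # Find the first tool tag
--     first_tag_index = len(content)
--     first_tag = None
--     for tag in tool_tags:
--         tag_start = content.find(f"<{tag}>")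
--         if tag_start != -1 and tag_start < first_tag_index:
--             first_tag_index = tag_start
--             first_tag = tag
--
--     if first_tag_index < len(content) and first_tag:
--         # Find the end of the tool block
--         end_tag = f"</{first_tag}>"
--         end_index = content.find(end_tag, first_tag_index)
--         if end_index != -1:
--             end_index += len(end_tag)
--
--             # Extract tool content
--             tool_content = content[first_tag_index:end_index].strip()
--
--             # Combine content before and after tool block
--             plain_content = (content[:first_tag_index] + content[end_index:]).strip()
--
--             return plain_content, tool_content
--
--     return content.strip(), None
-- ===== SOURCE B (Python) =====
-- from typing import Optional
--
-- def split_content(content: str) -> tuple[str, Optional[str]]: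
--     """Split content into plain text and the first tool block, by a single
--     left-to-right scan for the leftmost opening tag instead of per-tag find()."""
--     n = len(content)
--     i = 0
--     tag = None
--     while i < n:
--         if content.startswith("<use_mcp_tool>", i):
--             tag = "use_mcp_tool"
--             break
--         if content.startswith("<access_mcp_resource>", i):
--             tag = "access_mcp_resource"
--             break
--         i += 1
--     if tag is not None:
--         end_tag = "</" + tag + ">"
--         end_index = content.find(end_tag, i)
--         if end_index != -1:
--             end_index += len(end_tag)
--             return (content[:i] + content[end_index:]).strip(), content[i:end_index].strip()
--     return content.strip(), None
-- ===== Notes on version B (the rewrite author's own statement) =====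
-- stated objective: alternative
-- what changed: A loops over the tag list calling content.find for each tag and tracks the minimum index; B does one left-to-right positional scan testing startswith for either opening tag at each index, so the per-tag find passes and the minimum tracking disappear.
import Mathlib
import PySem

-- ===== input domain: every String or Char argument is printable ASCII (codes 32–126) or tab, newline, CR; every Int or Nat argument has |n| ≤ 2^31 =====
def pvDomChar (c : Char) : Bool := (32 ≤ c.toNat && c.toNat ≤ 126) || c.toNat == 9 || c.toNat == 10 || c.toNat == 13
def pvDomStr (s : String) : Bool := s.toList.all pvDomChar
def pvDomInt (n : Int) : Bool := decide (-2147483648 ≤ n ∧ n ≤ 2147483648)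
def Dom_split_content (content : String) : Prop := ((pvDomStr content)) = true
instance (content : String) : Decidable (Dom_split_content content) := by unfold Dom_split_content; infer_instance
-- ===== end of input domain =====

-- B replaces A's per-tag find()+minimum-tracking loop by ONE left-to-right scan
-- that tests both opening tags at each position (objective: alternative).

-- ===== PORT A =====
-- A: for each tag in the list, content.find("<tag>"); keep the smallest found index.
def split_content (content : String) : String × Option String :=
  let toolTags : List (List Char) := ["use_mcp_tool".toList, "access_mcp_resource".toList]
  let cs := content.toList
  let fr := toolTags.foldl
    (fun (acc : Int × Option (List Char)) tag =>
      let tagStart := PySem.Chars.find cs ('<' :: tag ++ ['>'])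
      if tagStart ≠ -1 ∧ tagStart < acc.1 then (tagStart, some tag) else acc)
    ((cs.length : Int), none)
  match fr with
  | (fti, some tag) =>
    if fti < (cs.length : Int) then
      let endTag := '<' :: '/' :: (tag ++ ['>'])
      let endIndex := PySem.Chars.findFrom cs endTag fti none
      if endIndex ≠ -1 then
        let endIndex := endIndex + (endTag.length : Int)
        let toolContent := PySem.Chars.strip (PySem.Chars.slice cs (some fti) (some endIndex))
        let plainContent := PySem.Chars.strip
          (PySem.Chars.slice cs none (some fti) ++ PySem.Chars.slice cs (some endIndex) none)
        (String.ofList plainContent, some (String.ofList toolContent))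
      else (String.ofList (PySem.Chars.strip cs), none)
    else (String.ofList (PySem.Chars.strip cs), none)
  | (_, none) => (String.ofList (PySem.Chars.strip cs), none)

-- ===== PORT B =====
-- B's while loop: advance an index, stop at the first position where either opening tag starts.
def scanOpen : List Char → Nat → Option (Nat × List Char)
  | [], _ => none
  | c :: rest, i =>
    if "<use_mcp_tool>".toList.isPrefixOf (c :: rest) then some (i, "use_mcp_tool".toList)
    else if "<access_mcp_resource>".toList.isPrefixOf (c :: rest) then some (i, "access_mcp_resource".toList)
    else scanOpen rest (i + 1)

def split_content_alt (content : String) : String × Option String :=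
  let cs := content.toList
  match scanOpen cs 0 with
  | some (i, tag) =>
    let endTag := '<' :: '/' :: (tag ++ ['>'])
    let endIndex := PySem.Chars.findFrom cs endTag (i : Int) none
    if endIndex ≠ -1 then
      let endIndex := endIndex + (endTag.length : Int)
      (String.ofList (PySem.Chars.strip
          (PySem.Chars.slice cs none (some (i : Int)) ++ PySem.Chars.slice cs (some endIndex) none)),
        some (String.ofList (PySem.Chars.strip (PySem.Chars.slice cs (some (i : Int)) (some endIndex)))))
    else (String.ofList (PySem.Chars.strip cs), none)
  | none => (String.ofList (PySem.Chars.strip cs), none)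

-- ===== PRECONDITION & SPEC =====
def Spec_split_content (content : String) (out : String × Option String) : Prop := out = split_content_alt content
instance (content : String) (out : String × Option String) : Decidable (Spec_split_content content out) := by unfold Spec_split_content; infer_instance

-- ===== CLAIM (what is proved, stated in full; the proofs are below) =====
def Claim_equal_split_content : Prop := ∀ (content : String), Dom_split_content content → Spec_split_content content (split_content content)

-- ===== LEMMAS AND PROOFS =====

lemma scanOpen_eq_none (cs : List Char) (i : Nat)
    (h1 : ∀ k, ¬ "<use_mcp_tool>".toList <+: cs.drop k)
    (h2 : ∀ k, ¬ "<access_mcp_resource>".toList <+: cs.drop k) :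
    scanOpen cs i = none := by
  induction cs generalizing i with
  | nil => rfl
  | cons c rest ih =>
    rw [scanOpen]
    rw [if_neg, if_neg]
    · exact ih (i + 1) (fun k => h1 (k + 1)) (fun k => h2 (k + 1))
    · simp only [List.isPrefixOf_iff_prefix]
      exact h2 0
    · simp only [List.isPrefixOf_iff_prefix]
      exact h1 0

lemma scanOpen_eq_some (cs : List Char) (i j : Nat) (tag : List Char)
    (hmin : ∀ k < j, ¬ "<use_mcp_tool>".toList <+: cs.drop k ∧ ¬ "<access_mcp_resource>".toList <+: cs.drop k)
    (hj : ("<use_mcp_tool>".toList <+: cs.drop j ∧ tag = "use_mcp_tool".toList) ∨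
          (¬ "<use_mcp_tool>".toList <+: cs.drop j ∧ "<access_mcp_resource>".toList <+: cs.drop j ∧
            tag = "access_mcp_resource".toList)) :
    scanOpen cs i = some (i + j, tag) := by
  induction cs generalizing i j with
  | nil =>
    exfalso
    rcases hj with ⟨h, _⟩ | ⟨_, h, _⟩ <;> simp_all [List.prefix_nil]
  | cons c rest ih =>
    cases j with
    | zero =>
      rw [scanOpen]
      rcases hj with ⟨h, htag⟩ | ⟨hn, h, htag⟩
      · rw [if_pos (by simpa [List.isPrefixOf_iff_prefix] using h)]
        simp [htag]
      · rw [if_neg (by simpa [List.isPrefixOf_iff_prefix] using hn),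
           if_pos (by simpa [List.isPrefixOf_iff_prefix] using h)]
        simp [htag]
    | succ j' =>
      rw [scanOpen]
      have h0 := hmin 0 (Nat.succ_pos j')
      rw [if_neg (by simpa [List.isPrefixOf_iff_prefix] using h0.1),
         if_neg (by simpa [List.isPrefixOf_iff_prefix] using h0.2)]
      have := ih (i + 1) j'
        (fun k hk => by simpa using hmin (k + 1) (by omega))
        (by simpa using hj)
      rw [this, Nat.add_right_comm, Nat.add_assoc]

-- a nonempty pattern, if found, is found strictly before the end
lemma find_lt_len (cs pat : List Char) (hne : pat ≠ [])
    (h : PySem.Chars.find cs pat ≠ -1) :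
    PySem.Chars.find cs pat < (cs.length : Int) := by
  have hlow : -1 ≤ PySem.Chars.find cs pat := PySem.Chars.neg_one_le_find cs pat
  have h0 : 0 ≤ PySem.Chars.find cs pat := by omega
  have hlen : pat.length ≤ (cs.drop (PySem.Chars.find cs pat).toNat).length :=
    (PySem.Chars.find_spec h0).1.length_le
  rw [List.length_drop] at hlen
  have hp : 0 < pat.length := List.length_pos_iff.mpr hne
  omega

-- no occurrence anywhere when find = -1
lemma no_prefix_of_find_neg (cs pat : List Char)
    (h : PySem.Chars.find cs pat = -1) : ∀ k, ¬ pat <+: cs.drop k := by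
  intro k hk
  have hin : PySem.Chars.isIn pat cs = true :=
    (PySem.Chars.exists_prefix_drop_iff_isIn pat cs).mp ⟨k, hk⟩
  exact (PySem.Chars.find_eq_neg_one_iff cs pat).mp h ((PySem.Chars.isIn_iff_infix pat cs).mp hin)

-- B's scan finds exactly the leftmost of the two find() results (A's minimum logic)
lemma scanOpen_main (cs : List Char) :
    scanOpen cs 0 =
      (if PySem.Chars.find cs "<use_mcp_tool>".toList ≠ -1 then
        if PySem.Chars.find cs "<access_mcp_resource>".toList ≠ -1 ∧
            PySem.Chars.find cs "<access_mcp_resource>".toList < PySem.Chars.find cs "<use_mcp_tool>".toList then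
          some ((PySem.Chars.find cs "<access_mcp_resource>".toList).toNat, "access_mcp_resource".toList)
        else some ((PySem.Chars.find cs "<use_mcp_tool>".toList).toNat, "use_mcp_tool".toList)
      else if PySem.Chars.find cs "<access_mcp_resource>".toList ≠ -1 then
        some ((PySem.Chars.find cs "<access_mcp_resource>".toList).toNat, "access_mcp_resource".toList)
      else none) := by
  by_cases h1 : PySem.Chars.find cs "<use_mcp_tool>".toList = -1 <;>
    by_cases h2 : PySem.Chars.find cs "<access_mcp_resource>".toList = -1
  · rw [if_neg (not_not_intro h1), if_neg (not_not_intro h2)]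
    exact scanOpen_eq_none cs 0 (no_prefix_of_find_neg _ _ h1) (no_prefix_of_find_neg _ _ h2)
  · -- only the second tag occurs
    have hlow := PySem.Chars.neg_one_le_find cs "<access_mcp_resource>".toList
    have h02 : 0 ≤ PySem.Chars.find cs "<access_mcp_resource>".toList := by omega
    have hspec2 := PySem.Chars.find_spec h02
    rw [if_neg (not_not_intro h1), if_pos h2]
    have := scanOpen_eq_some cs 0 (PySem.Chars.find cs "<access_mcp_resource>".toList).toNat
      "access_mcp_resource".toList
      (fun k hk => ⟨no_prefix_of_find_neg _ _ h1 k, hspec2.2 k hk⟩)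
      (Or.inr ⟨no_prefix_of_find_neg _ _ h1 _, hspec2.1, rfl⟩)
    simpa using this
  · -- only the first tag occurs
    have hlow := PySem.Chars.neg_one_le_find cs "<use_mcp_tool>".toList
    have h01 : 0 ≤ PySem.Chars.find cs "<use_mcp_tool>".toList := by omega
    have hspec1 := PySem.Chars.find_spec h01
    rw [if_pos h1, if_neg (fun hc => hc.1 h2)]
    have := scanOpen_eq_some cs 0 (PySem.Chars.find cs "<use_mcp_tool>".toList).toNat
      "use_mcp_tool".toList
      (fun k hk => ⟨hspec1.2 k hk, no_prefix_of_find_neg _ _ h2 k⟩)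
      (Or.inl ⟨hspec1.1, rfl⟩)
    simpa using this
  · -- both occur: the smaller index wins (tie kept by the first tag, as in A)
    have hlow1 := PySem.Chars.neg_one_le_find cs "<use_mcp_tool>".toList
    have hlow2 := PySem.Chars.neg_one_le_find cs "<access_mcp_resource>".toList
    have h01 : 0 ≤ PySem.Chars.find cs "<use_mcp_tool>".toList := by omega
    have h02 : 0 ≤ PySem.Chars.find cs "<access_mcp_resource>".toList := by omega
    have hspec1 := PySem.Chars.find_spec h01
    have hspec2 := PySem.Chars.find_spec h02
    rw [if_pos h1]
    by_cases h3 : PySem.Chars.find cs "<access_mcp_resource>".toList <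
        PySem.Chars.find cs "<use_mcp_tool>".toList
    · rw [if_pos ⟨h2, h3⟩]
      have h3n : (PySem.Chars.find cs "<access_mcp_resource>".toList).toNat <
          (PySem.Chars.find cs "<use_mcp_tool>".toList).toNat := by omega
      have := scanOpen_eq_some cs 0 (PySem.Chars.find cs "<access_mcp_resource>".toList).toNat
        "access_mcp_resource".toList
        (fun k hk => ⟨hspec1.2 k (by omega), hspec2.2 k hk⟩)
        (Or.inr ⟨hspec1.2 _ h3n, hspec2.1, rfl⟩)
      simpa using this
    · rw [if_neg (fun hc => h3 hc.2)]
      have hle : (PySem.Chars.find cs "<use_mcp_tool>".toList).toNat ≤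
          (PySem.Chars.find cs "<access_mcp_resource>".toList).toNat := by omega
      have := scanOpen_eq_some cs 0 (PySem.Chars.find cs "<use_mcp_tool>".toList).toNat
        "use_mcp_tool".toList
        (fun k hk => ⟨hspec1.2 k hk, hspec2.2 k (by omega)⟩)
        (Or.inl ⟨hspec1.1, rfl⟩)
      simpa using this
-- ===== VERDICT (by name: the statement is the Claim_ definition above) =====
theorem split_content_spec : Claim_equal_split_content := by
  intro content _
  unfold Spec_split_content split_content split_content_alt
  simp only [List.foldl_cons, List.foldl_nil]
  rw [scanOpen_main]
  have e1 : ('<' :: "use_mcp_tool".toList ++ ['>'] : List Char) = "<use_mcp_tool>".toList := by decide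
  have e2 : ('<' :: "access_mcp_resource".toList ++ ['>'] : List Char) = "<access_mcp_resource>".toList := by decide
  rw [e1, e2]
  by_cases h1 : PySem.Chars.find content.toList "<use_mcp_tool>".toList = -1 <;>
    by_cases h2 : PySem.Chars.find content.toList "<access_mcp_resource>".toList = -1
  · rw [if_neg (fun hc => hc.1 h2), if_neg (fun hc => hc.1 h1),
      if_neg (not_not_intro h1), if_neg (not_not_intro h2)]
  · have hlt2 : PySem.Chars.find content.toList "<access_mcp_resource>".toList < (content.toList.length : Int) := find_lt_len _ _ (by decide) h2
    have h02 : 0 ≤ PySem.Chars.find content.toList "<access_mcp_resource>".toList := by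
      have := PySem.Chars.neg_one_le_find content.toList "<access_mcp_resource>".toList; omega
    rw [if_neg (show ¬(PySem.Chars.find content.toList "<use_mcp_tool>".toList ≠ -1 ∧ PySem.Chars.find content.toList "<use_mcp_tool>".toList < (content.toList.length : Int)) from fun hc => hc.1 h1)]
    rw [if_pos (show PySem.Chars.find content.toList "<access_mcp_resource>".toList ≠ -1 ∧ PySem.Chars.find content.toList "<access_mcp_resource>".toList < (((content.toList.length : Int), (none : Option (List Char))).1) from ⟨h2, hlt2⟩)]
    rw [if_neg (not_not_intro h1), if_pos h2]
    dsimp only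
    rw [Int.toNat_of_nonneg h02, if_pos hlt2]
  · have hlt1 : PySem.Chars.find content.toList "<use_mcp_tool>".toList < (content.toList.length : Int) := find_lt_len _ _ (by decide) h1
    have h01 : 0 ≤ PySem.Chars.find content.toList "<use_mcp_tool>".toList := by
      have := PySem.Chars.neg_one_le_find content.toList "<use_mcp_tool>".toList; omega
    rw [if_pos (show PySem.Chars.find content.toList "<use_mcp_tool>".toList ≠ -1 ∧ PySem.Chars.find content.toList "<use_mcp_tool>".toList < (content.toList.length : Int) from ⟨h1, hlt1⟩)]
    rw [if_neg (fun hc => hc.1 h2), if_pos h1, if_neg (fun hc => hc.1 h2)]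
    dsimp only
    rw [Int.toNat_of_nonneg h01, if_pos hlt1]
  · have hlt1 : PySem.Chars.find content.toList "<use_mcp_tool>".toList < (content.toList.length : Int) := find_lt_len _ _ (by decide) h1
    have hlt2 : PySem.Chars.find content.toList "<access_mcp_resource>".toList < (content.toList.length : Int) := find_lt_len _ _ (by decide) h2
    have h01 : 0 ≤ PySem.Chars.find content.toList "<use_mcp_tool>".toList := by
      have := PySem.Chars.neg_one_le_find content.toList "<use_mcp_tool>".toList; omega
    have h02 : 0 ≤ PySem.Chars.find content.toList "<access_mcp_resource>".toList := by
      have := PySem.Chars.neg_one_le_find content.toList "<access_mcp_resource>".toList; omega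
    by_cases h3 : PySem.Chars.find content.toList "<access_mcp_resource>".toList < PySem.Chars.find content.toList "<use_mcp_tool>".toList
    · rw [if_pos (show PySem.Chars.find content.toList "<use_mcp_tool>".toList ≠ -1 ∧ PySem.Chars.find content.toList "<use_mcp_tool>".toList < (content.toList.length : Int) from ⟨h1, hlt1⟩)]
      rw [if_pos (show PySem.Chars.find content.toList "<access_mcp_resource>".toList ≠ -1 ∧ PySem.Chars.find content.toList "<access_mcp_resource>".toList < ((PySem.Chars.find content.toList "<use_mcp_tool>".toList, some "use_mcp_tool".toList).1) from ⟨h2, h3⟩)]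
      rw [if_pos h1]
      rw [if_pos (show PySem.Chars.find content.toList "<access_mcp_resource>".toList ≠ -1 ∧ PySem.Chars.find content.toList "<access_mcp_resource>".toList < PySem.Chars.find content.toList "<use_mcp_tool>".toList from ⟨h2, h3⟩)]
      dsimp only
      rw [Int.toNat_of_nonneg h02, if_pos hlt2]
    · rw [if_pos (show PySem.Chars.find content.toList "<use_mcp_tool>".toList ≠ -1 ∧ PySem.Chars.find content.toList "<use_mcp_tool>".toList < (content.toList.length : Int) from ⟨h1, hlt1⟩)]
      rw [if_neg (show ¬(PySem.Chars.find content.toList "<access_mcp_resource>".toList ≠ -1 ∧ PySem.Chars.find content.toList "<access_mcp_resource>".toList < ((PySem.Chars.find content.toList "<use_mcp_tool>".toList, some "use_mcp_tool".toList).1)) from fun hc => h3 hc.2)]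
      rw [if_pos h1]
      rw [if_neg (show ¬(PySem.Chars.find content.toList "<access_mcp_resource>".toList ≠ -1 ∧ PySem.Chars.find content.toList "<access_mcp_resource>".toList < PySem.Chars.find content.toList "<use_mcp_tool>".toList) from fun hc => h3 hc.2)]
      dsimp only
      rw [Int.toNat_of_nonneg h01, if_pos hlt1]
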